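-- pv_equiv track=rewrite | github.com/ChampSim/ChampSim | config/util.py | propogate_down
-- ===== SOURCE A (Python) =====
-- import itertools
-- import operator
--
-- def propogate_down(path, key):
--     '''
--     Propogate the value of a key down a path of dictionaries.
--     Later elements inherit the value from earlier elements, unless they have one themselves.
--
--     :param path: an iterable of dictionary values
--     :param key: they dictionary key to propogate
--     '''
--     value = None
--     for new_value,chunk in itertools.groupby(path, key=operator.methodcaller('get', key)):
--         if new_value is not None:
--             yield from chunk
--             value = new_value
--         else:
--             yield from ({ **element, key: value } for element in chunk)
-- ===== SOURCE B (Python) =====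
-- import itertools
--
-- def propogate_down(path, key):
--     '''
--     Propogate the value of a key down a path of dictionaries.
--     Later elements inherit the value from earlier elements, unless they have one themselves.
--
--     :param path: an iterable of dictionary values
--     :param key: they dictionary key to propogate
--     '''
--     path = list(path)
--     gets = [element.get(key) for element in path]
--     # carried[i] = last non-None get among elements before i (None if there is none)
--     carried = list(itertools.accumulate(
--         [None] + gets, lambda acc, ev: ev if ev is not None else acc))[:-1]
--     for element, ev, c in zip(path, gets, carried):
--         yield element if ev is not None else {**element, key: c}
-- ===== Notes on version B (the rewrite author's own statement) =====
-- stated objective: alternative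
-- what changed: Replaced A's single groupby-driven streaming loop by a staged pipeline: first extract all element.get(key) values, then compute the carried value for every position with itertools.accumulate (a prefix scan), then zip the three sequences to build each output element independently.
import Mathlib
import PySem

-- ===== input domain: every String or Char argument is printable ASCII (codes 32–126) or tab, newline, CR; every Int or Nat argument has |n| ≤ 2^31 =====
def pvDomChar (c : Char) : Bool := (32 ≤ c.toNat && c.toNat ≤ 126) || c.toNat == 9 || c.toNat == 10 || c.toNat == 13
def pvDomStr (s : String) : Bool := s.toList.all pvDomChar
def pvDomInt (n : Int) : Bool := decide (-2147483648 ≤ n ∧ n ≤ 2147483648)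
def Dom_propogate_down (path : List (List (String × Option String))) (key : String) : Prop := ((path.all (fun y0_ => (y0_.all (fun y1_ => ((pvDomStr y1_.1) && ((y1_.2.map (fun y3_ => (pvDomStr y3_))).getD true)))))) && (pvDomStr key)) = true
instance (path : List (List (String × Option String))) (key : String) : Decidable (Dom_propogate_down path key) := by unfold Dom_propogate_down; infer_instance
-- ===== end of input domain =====

-- B replaces A's groupby-driven streaming loop by a staged pipeline (extract gets, prefix-scan the carried
-- values, zip and rebuild each element independently); objective: alternative decomposition, same cost.
-- ===== PORT A =====
-- element.get(key): first matching pair; missing key and a stored None both give none (exact by-hand port of dict.get)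
def pyDictGet (e : List (String × Option String)) (key : String) : Option String :=
  (e.find? (fun p => p.1 == key)).bind (fun p => p.2)

-- {**element, key: v}: replace the value at the (first) occurrence of key, else append (exact for dicts, whose keys are unique)
def pySetKey (e : List (String × Option String)) (key : String) (v : Option String) : List (String × Option String) :=
  match e with
  | [] => [(key, v)]
  | p :: rest => if p.1 == key then (key, v) :: rest else p :: pySetKey rest key v

-- the groupby loop: each step peels off one maximal run of equal element.get(key) (one groupby chunk) and handles it as A does
def propogate_down_go (key : String) (value : Option String) :
    List (List (String × Option String)) → List (List (String × Option String))
  | [] => []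
  | e :: rest =>
    let nv := pyDictGet e key
    let chunk := e :: rest.takeWhile (fun x => pyDictGet x key == nv)
    let rest' := rest.dropWhile (fun x => pyDictGet x key == nv)
    match nv with
    | some v => chunk ++ propogate_down_go key (some v) rest'
    | none => chunk.map (fun el => pySetKey el key value) ++ propogate_down_go key value rest'
  termination_by l => l.length
  decreasing_by
    all_goals simp only [List.length_cons]
    all_goals exact Nat.lt_succ_of_le (List.length_dropWhile_le _ _)

def propogate_down (path : List (List (String × Option String))) (key : String) :
    List (List (String × Option String)) :=
  propogate_down_go key none path

-- ===== PORT B =====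
-- Source B staged pipeline. itertools.accumulate([None]+gets, f) is exactly List.scanl f none gets
-- (first output = the prepended None, then each fold step); [:-1] is dropLast.
def propogate_down_alt (path : List (List (String × Option String))) (key : String) :
    List (List (String × Option String)) :=
  let gets := path.map (fun element => pyDictGet element key)
  let carried := (List.scanl (fun acc ev => if ev.isSome then ev else acc) none gets).dropLast
  (path.zip (gets.zip carried)).map
    (fun t => if t.2.1.isSome then t.1 else pySetKey t.1 key t.2.2)

-- ===== PRECONDITION & SPEC =====
def Spec_propogate_down (path : List (List (String × Option String))) (key : String) (out : List (List (String × Option String))) : Prop := out = propogate_down_alt path key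
instance (path : List (List (String × Option String))) (key : String) (out : List (List (String × Option String))) : Decidable (Spec_propogate_down path key out) := by unfold Spec_propogate_down; infer_instance

-- ===== CLAIM (what is proved, stated in full; the proofs are below) =====
def Claim_equal_propogate_down : Prop := ∀ (path : List (List (String × Option String))) (key : String), Dom_propogate_down path key → Spec_propogate_down path key (propogate_down path key)

-- ===== LEMMAS AND PROOFS =====
-- proof-only bridge: the obvious per-element recursion carrying the last seen value
def simpleGo (key : String) (value : Option String) :
    List (List (String × Option String)) → List (List (String × Option String))
  | [] => []
  | e :: rest =>
    match pyDictGet e key with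
    | some v => e :: simpleGo key (some v) rest
    | none => pySetKey e key value :: simpleGo key value rest

-- B generalized over the scan's start value equals simpleGo
theorem simpleGo_eq_pipeline (key : String) :
    ∀ (path : List (List (String × Option String))) (value : Option String),
      simpleGo key value path =
        ((path.zip ((path.map (fun element => pyDictGet element key)).zip
            ((List.scanl (fun acc ev => if ev.isSome then ev else acc) value
              (path.map (fun element => pyDictGet element key))).dropLast))).map
          (fun t => if t.2.1.isSome then t.1 else pySetKey t.1 key t.2.2)) := by
  intro path
  induction path with
  | nil => intro value; rfl
  | cons e rest ih =>
    intro value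
    simp only [List.map_cons, List.scanl_cons]
    rw [List.dropLast_cons_of_ne_nil (by simp)]
    simp only [List.zip_cons_cons, List.map_cons]
    cases hnv : pyDictGet e key with
    | some v =>
      simp only [simpleGo, hnv, Option.isSome_some, if_true]
      rw [ih (some v)]
    | none =>
      simp only [simpleGo, hnv, Option.isSome_none]
      rw [ih value]
      simp

-- B over a run whose elements all have get = some v, with value already some v
theorem simpleGo_some_run (key : String) (v : String)
    (l t : List (List (String × Option String)))
    (h : ∀ x ∈ l, pyDictGet x key = some v) :
    simpleGo key (some v) (l ++ t) = l ++ simpleGo key (some v) t := by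
  induction l with
  | nil => rfl
  | cons e l ih =>
    have he : pyDictGet e key = some v := h e (by simp)
    simp only [List.cons_append, simpleGo, he]
    rw [ih (fun x hx => h x (by simp [hx]))]

-- B over a run whose elements all have get = none: each element gets key set to the carried value
theorem simpleGo_none_run (key : String) (u : Option String)
    (l t : List (List (String × Option String)))
    (h : ∀ x ∈ l, pyDictGet x key = none) :
    simpleGo key u (l ++ t)
      = l.map (fun el => pySetKey el key u) ++ simpleGo key u t := by
  induction l with
  | nil => rfl
  | cons e l ih =>
    have he : pyDictGet e key = none := h e (by simp)
    simp only [List.cons_append, simpleGo, he, List.map_cons]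
    rw [ih (fun x hx => h x (by simp [hx]))]

theorem go_eq_simpleGo (key : String) :
    ∀ (n : Nat) (path : List (List (String × Option String))), path.length ≤ n →
      ∀ (value : Option String),
        propogate_down_go key value path = simpleGo key value path := by
  intro n
  induction n with
  | zero =>
    intro path hp value
    have : path = [] := List.eq_nil_of_length_eq_zero (Nat.le_zero.mp hp)
    subst this
    simp [propogate_down_go, simpleGo]
  | succ n ih =>
    intro path hp value
    match path with
    | [] => simp [propogate_down_go, simpleGo]
    | e :: rest =>
      have hsplit := List.takeWhile_append_dropWhile
        (p := fun x => pyDictGet x key == pyDictGet e key) (l := rest)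
      have hmem : ∀ x ∈ rest.takeWhile (fun x => pyDictGet x key == pyDictGet e key),
          pyDictGet x key = pyDictGet e key := by
        intro x hx
        exact eq_of_beq (List.mem_takeWhile_imp
          (p := fun x => pyDictGet x key == pyDictGet e key) hx)
      have hlen : (rest.dropWhile (fun x => pyDictGet x key == pyDictGet e key)).length ≤ n := by
        have h1 := List.length_dropWhile_le
          (p := fun x => pyDictGet x key == pyDictGet e key) (l := rest)
        have h2 : rest.length ≤ n := by
          simpa using Nat.le_of_succ_le_succ hp
        omega
      cases hnv : pyDictGet e key with
      | some v =>
        rw [hnv] at hsplit hlen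
        simp only [hnv] at hmem
        rw [propogate_down_go]
        simp only [hnv]
        rw [ih _ hlen]
        conv_rhs => rw [← hsplit]
        rw [show simpleGo key value
              (e :: (List.takeWhile (fun x => pyDictGet x key == some v) rest
                    ++ List.dropWhile (fun x => pyDictGet x key == some v) rest))
            = e :: simpleGo key (some v)
              (List.takeWhile (fun x => pyDictGet x key == some v) rest
                    ++ List.dropWhile (fun x => pyDictGet x key == some v) rest)
          from by rw [simpleGo, hnv]]
        rw [simpleGo_some_run key v _ _ hmem]
        simp
      | none =>
        rw [hnv] at hsplit hlen
        simp only [hnv] at hmem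
        rw [propogate_down_go]
        simp only [hnv]
        rw [ih _ hlen]
        conv_rhs => rw [← hsplit]
        rw [show simpleGo key value
              (e :: (List.takeWhile (fun x => pyDictGet x key == none) rest
                    ++ List.dropWhile (fun x => pyDictGet x key == none) rest))
            = pySetKey e key value :: simpleGo key value
              (List.takeWhile (fun x => pyDictGet x key == none) rest
                    ++ List.dropWhile (fun x => pyDictGet x key == none) rest)
          from by rw [simpleGo, hnv]]
        rw [simpleGo_none_run key value _ _ hmem]
        simp

-- ===== VERDICT (by name: the statement is the Claim_ definition above) =====
theorem propogate_down_spec : Claim_equal_propogate_down := by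
  intro path key _
  unfold Spec_propogate_down propogate_down propogate_down_alt
  rw [go_eq_simpleGo key path.length path (le_refl _) none]
  exact simpleGo_eq_pipeline key path none
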